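-- pv_equiv track=rewrite | github.com/adobe/kompos | src/kompos/helpers/console.py | format_config_path
-- ===== SOURCE A (Python) =====
-- class Colors:
--     RED = '\033[91m'
--     GREEN = '\033[92m'
--     YELLOW = '\033[93m'
--     BLUE = '\033[94m'
--     MAGENTA = '\033[95m'
--     CYAN = '\033[96m'
--     WHITE = '\033[97m'
--     GRAY = '\033[90m'
--     BOLD = '\033[1m'
--     DIM = '\033[2m'
--     RESET = '\033[0m'
--
--     # Background colors
--     BG_BLUE = '\033[44m'
--     BG_CYAN = '\033[46m'
--
-- def format_config_path(path):
--     """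
--     Format a hierarchical config path with colored keys and values.
--
--     Example: configs/cloud=aws/project=demo/env=dev
--     Returns: configs/cloud=aws/project=demo/env=dev with colors
--     """
--     if not path:
--         return path
--
--     parts = path.split('/')
--     formatted_parts = []
--
--     for part in parts:
--         if '=' in part:
--             key, value = part.split('=', 1)
--             # Key in normal green, value in bold
--             formatted_parts.append(f"{Colors.GREEN}{key}={Colors.RESET}{Colors.BOLD}{value}{Colors.RESET}")
--         else:
--             # No '=' means it's just a directory name
--             formatted_parts.append(part)
--
--     return '/'.join(formatted_parts)
-- ===== SOURCE B (Python) =====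
-- class Colors:
--     RED = '\033[91m'
--     GREEN = '\033[92m'
--     YELLOW = '\033[93m'
--     BLUE = '\033[94m'
--     MAGENTA = '\033[95m'
--     CYAN = '\033[96m'
--     WHITE = '\033[97m'
--     GRAY = '\033[90m'
--     BOLD = '\033[1m'
--     DIM = '\033[2m'
--     RESET = '\033[0m'
--
--     # Background colors
--     BG_BLUE = '\033[44m'
--     BG_CYAN = '\033[46m'
--
--
-- def format_config_path(path):
--     """Single left-to-right scan: a small state machine emits the colored
--     output as the characters stream by; no split/join, no intermediate parts."""
--     out = []
--     run = []          # characters of the current segment seen before any '=' or '/'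
--     in_value = False  # True while streaming a value (after '=', before '/')
--     for ch in path:
--         if in_value:
--             if ch == '/':
--                 out.append(Colors.RESET)
--                 out.append('/')
--                 in_value = False
--             else:
--                 out.append(ch)
--         elif ch == '=':
--             out.append(Colors.GREEN)
--             out.extend(run)
--             out.append('=')
--             out.append(Colors.RESET)
--             out.append(Colors.BOLD)
--             run = []
--             in_value = True
--         elif ch == '/':
--             out.extend(run)
--             out.append('/')
--             run = []
--         else:
--             run.append(ch)
--     if in_value:
--         out.append(Colors.RESET)
--     else:
--         out.extend(run)
--     return ''.join(out)
-- ===== Notes on version B (the rewrite author's own statement) =====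
-- stated objective: alternative
-- what changed: A splits the path into segments, re-splits each segment once at the key/value separator and joins the formatted segments back; B is a single streaming state-machine pass over the characters that emits the colored output directly, with no splitting or joining and no intermediate segment list.
import Mathlib
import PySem

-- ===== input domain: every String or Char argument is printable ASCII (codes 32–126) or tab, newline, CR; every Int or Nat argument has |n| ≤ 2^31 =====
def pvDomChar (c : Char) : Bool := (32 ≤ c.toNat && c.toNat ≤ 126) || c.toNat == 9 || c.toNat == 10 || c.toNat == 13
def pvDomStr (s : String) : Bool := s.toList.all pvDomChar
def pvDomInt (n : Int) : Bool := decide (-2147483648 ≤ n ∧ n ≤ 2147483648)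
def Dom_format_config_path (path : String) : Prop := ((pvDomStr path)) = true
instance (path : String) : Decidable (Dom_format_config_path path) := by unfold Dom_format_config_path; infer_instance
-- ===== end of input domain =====

-- B replaces A's split('/')/per-part-split('=',1)/join pipeline by a single streaming
-- state-machine pass that emits the colored output character by character (objective: alternative).

-- ANSI color constants of the module (Colors.GREEN / Colors.BOLD / Colors.RESET), as char lists
def cGREEN : List Char := ['\x1b', '[', '9', '2', 'm']
def cBOLD : List Char := ['\x1b', '[', '1', 'm']
def cRESET : List Char := ['\x1b', '[', '0', 'm']

-- ===== PORT A =====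
-- body of A's per-part branch: if '=' in part: key, value = part.split('=', 1); f-string else part
def fmtPartA (part : List Char) : List Char :=
  if PySem.Chars.isIn ['='] part then
    match PySem.Chars.splitOnMax part ['='] 1 with
    | [key, value] => cGREEN ++ key ++ '=' :: (cRESET ++ cBOLD ++ value ++ cRESET)
    | _ => []  -- unreachable: split('=', 1) with '=' present always yields exactly two pieces
  else part

def format_config_path (path : String) : String :=
  if path = "" then path
  else
    let parts := PySem.Chars.splitOn path.toList ['/']
    let formatted := parts.foldl (fun acc part => acc ++ [fmtPartA part]) []
    String.ofList (PySem.Chars.join ['/'] formatted)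

-- ===== PORT B =====
-- the streaming state machine of Source B: run = pending segment chars, inv = in_value flag
def goB : List Char → List Char → Bool → List Char
  | [], run, inv => if inv then cRESET else run
  | c :: rest, run, inv =>
    if inv then
      if c = '/' then cRESET ++ '/' :: goB rest run false
      else c :: goB rest run true
    else if c = '=' then cGREEN ++ run ++ '=' :: (cRESET ++ cBOLD ++ goB rest [] true)
    else if c = '/' then run ++ '/' :: goB rest [] false
    else goB rest (run ++ [c]) false

def format_config_path_alt (path : String) : String :=
  String.ofList (goB path.toList [] false)

-- ===== PRECONDITION & SPEC =====
def Spec_format_config_path (path : String) (out : String) : Prop := out = format_config_path_alt path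
instance (path : String) (out : String) : Decidable (Spec_format_config_path path out) := by unfold Spec_format_config_path; infer_instance

-- ===== CLAIM (what is proved, stated in full; the proofs are below) =====
def Claim_equal_format_config_path : Prop := ∀ (path : String), Dom_format_config_path path → Spec_format_config_path path (format_config_path path)

-- ===== LEMMAS AND PROOFS =====

-- clean structural recursion computing path.split('/')
def mySplit : List Char → List (List Char)
  | [] => [[]]
  | c :: r => if c = '/' then [] :: mySplit r else (mySplit r).modifyHead (c :: ·)

lemma mySplit_ne_nil (cs : List Char) : mySplit cs ≠ [] := by
  cases cs with
  | nil => simp [mySplit]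
  | cons c r =>
    simp only [mySplit]
    split
    · simp
    · cases h : mySplit r with
      | nil => exact absurd h (mySplit_ne_nil r)
      | cons a t => simp

lemma inter_cons_cons (sep x y : List Char) (t : List (List Char)) :
    List.intercalate sep (x :: y :: t) = x ++ sep ++ List.intercalate sep (y :: t) := by
  simp [List.intercalate, List.intersperse]

lemma modifyHead_id (l : List (List Char)) : l.modifyHead (fun x => [] ++ x) = l := by
  cases l <;> simp

lemma modifyHead_id' (l : List (List Char)) : l.modifyHead (fun x => x) = l := by
  cases l <;> simp

lemma splitOn_go_eq (fuel : Nat) : ∀ (l cur : List Char) (accs : List (List Char)),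
    l.length < fuel →
    PySem.Chars.splitOn.go ['/'] fuel l cur accs = accs.reverse ++ (mySplit l).modifyHead (cur.reverse ++ ·) := by
  induction fuel with
  | zero => intro l cur accs h; omega
  | succ fuel ih =>
    intro l cur accs h
    cases l with
    | nil => simp [PySem.Chars.splitOn.go, mySplit]
    | cons c rest =>
      by_cases hc : c = '/'
      · subst hc
        rw [show PySem.Chars.splitOn.go ['/'] (fuel + 1) ('/' :: rest) cur accs =
              PySem.Chars.splitOn.go ['/'] fuel (List.drop 1 ('/' :: rest)) [] (cur.reverse :: accs) by
            simp [PySem.Chars.splitOn.go]]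
        rw [ih _ _ _ (by simp at h ⊢; omega)]
        simp [mySplit, modifyHead_id']
      · rw [show PySem.Chars.splitOn.go ['/'] (fuel + 1) (c :: rest) cur accs =
              PySem.Chars.splitOn.go ['/'] fuel rest (c :: cur) accs by
            simp [PySem.Chars.splitOn.go, List.isPrefixOf, Ne.symm hc]]
        rw [ih _ _ _ (by simp at h; omega)]
        simp [mySplit, hc, List.modifyHead_modifyHead, Function.comp_def]

lemma splitOn_eq (cs : List Char) : PySem.Chars.splitOn cs ['/'] = mySplit cs := by
  have := splitOn_go_eq (cs.length + 1) cs [] [] (by omega)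
  simpa [PySem.Chars.splitOn, modifyHead_id'] using this

lemma splitOnMax_go_zero (fuel : Nat) (l cur : List Char) (accs : List (List Char)) (h : 0 < fuel) :
    PySem.Chars.splitOnMax.go ['='] fuel 0 l cur accs = accs.reverse ++ [cur.reverse ++ l] := by
  cases fuel with
  | zero => omega
  | succ fuel => cases l <;> simp [PySem.Chars.splitOnMax.go]

lemma splitOnMax_go_one (fuel : Nat) : ∀ (l cur : List Char) (accs : List (List Char)),
    l.length < fuel →
    PySem.Chars.splitOnMax.go ['='] fuel 1 l cur accs =
      if '=' ∈ l then
        accs.reverse ++ [cur.reverse ++ l.takeWhile (· != '='), l.drop ((l.takeWhile (· != '=')).length + 1)]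
      else accs.reverse ++ [cur.reverse ++ l] := by
  induction fuel with
  | zero => intro l cur accs h; omega
  | succ fuel ih =>
    intro l cur accs h
    cases l with
    | nil => simp [PySem.Chars.splitOnMax.go]
    | cons c rest =>
      by_cases hc : c = '='
      · subst hc
        rw [show PySem.Chars.splitOnMax.go ['='] (fuel + 1) 1 ('=' :: rest) cur accs =
              PySem.Chars.splitOnMax.go ['='] fuel 0 (List.drop 1 ('=' :: rest)) [] (cur.reverse :: accs) by
            simp [PySem.Chars.splitOnMax.go]]
        rw [splitOnMax_go_zero fuel _ _ _ (by simp at h; omega)]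
        simp
      · rw [show PySem.Chars.splitOnMax.go ['='] (fuel + 1) 1 (c :: rest) cur accs =
              PySem.Chars.splitOnMax.go ['='] fuel 1 rest (c :: cur) accs by
            simp [PySem.Chars.splitOnMax.go, List.isPrefixOf, Ne.symm hc]]
        rw [ih _ _ _ (by simp at h; omega)]
        by_cases hm : '=' ∈ rest <;> simp [hm, hc, Ne.symm hc]

lemma splitOnMax_eq (part : List Char) (h : '=' ∈ part) :
    PySem.Chars.splitOnMax part ['='] 1 =
      [part.takeWhile (· != '='), part.drop ((part.takeWhile (· != '=')).length + 1)] := by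
  have := splitOnMax_go_one (part.length + 1) part [] [] (by omega)
  simpa [PySem.Chars.splitOnMax, h] using this

lemma isIn_eq_mem (part : List Char) : PySem.Chars.isIn ['='] part = true ↔ '=' ∈ part := by
  rw [PySem.Chars.isIn_iff_infix, List.singleton_infix_iff]

lemma fmtPartA_no_eq (part : List Char) (h : '=' ∉ part) : fmtPartA part = part := by
  have : PySem.Chars.isIn ['='] part = false := by
    rw [← Bool.not_eq_true, isIn_eq_mem]; exact h
  simp [fmtPartA, this]

lemma fmtPartA_with_eq (part : List Char) (h : '=' ∈ part) :
    fmtPartA part =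
      cGREEN ++ part.takeWhile (· != '=') ++
        '=' :: (cRESET ++ cBOLD ++ part.drop ((part.takeWhile (· != '=')).length + 1) ++ cRESET) := by
  have h1 : PySem.Chars.isIn ['='] part = true := (isIn_eq_mem part).mpr h
  simp [fmtPartA, h1, splitOnMax_eq part h]

-- the segments after the first '/' of cs (if any), already split
def restSegs (cs : List Char) : List (List Char) :=
  match cs.dropWhile (· != '/') with
  | [] => []
  | _ :: r => mySplit r

lemma mySplit_eq_cons (cs : List Char) :
    mySplit cs = cs.takeWhile (· != '/') :: restSegs cs := by
  induction cs with
  | nil => simp [mySplit, restSegs]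
  | cons c r ih =>
    by_cases hc : c = '/'
    · simp [mySplit, restSegs, hc]
    · simp [mySplit, restSegs, hc, ih]

lemma join_cons (x : List Char) (segs : List (List Char)) (h : segs ≠ []) :
    PySem.Chars.join ['/'] (x :: segs) = x ++ '/' :: PySem.Chars.join ['/'] segs := by
  cases segs with
  | nil => exact absurd rfl h
  | cons y t =>
    show List.intercalate ['/'] (x :: y :: t) = _
    rw [inter_cons_cons]
    simp [PySem.Chars.join]

-- the two mutual invariants of B's state machine, by strong induction on the input length
lemma goB_inv (n : Nat) : ∀ cs : List Char, cs.length ≤ n →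
    ((∀ run : List Char, '=' ∉ run → '/' ∉ run →
        goB cs run false =
          PySem.Chars.join ['/'] (((mySplit cs).modifyHead (run ++ ·)).map fmtPartA)) ∧
      goB cs [] true =
        cs.takeWhile (· != '/') ++ cRESET ++
          (match cs.dropWhile (· != '/') with
            | [] => []
            | _ :: r => '/' :: PySem.Chars.join ['/'] ((mySplit r).map fmtPartA))) := by
  induction n with
  | zero =>
    intro cs hlen
    have : cs = [] := List.eq_nil_of_length_eq_zero (by omega)
    subst this
    refine ⟨fun run h1 h2 => ?_, by simp [goB, cRESET]⟩
    simp [goB, mySplit, fmtPartA_no_eq _ h1]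
  | succ n ih =>
    intro cs hlen
    cases cs with
    | nil =>
      refine ⟨fun run h1 h2 => ?_, by simp [goB, cRESET]⟩
      simp [goB, mySplit, fmtPartA_no_eq _ h1]
    | cons c rest =>
      have hrest : rest.length ≤ n := by simp at hlen; omega
      obtain ⟨ihK, ihV⟩ := ih rest hrest
      constructor
      · -- key/plain mode
        intro run h1 h2
        by_cases hc : c = '='
        · subst hc
          have hne : ('=' : Char) ≠ '/' := by decide
          rw [show goB ('=' :: rest) run false
                = cGREEN ++ run ++ '=' :: (cRESET ++ cBOLD ++ goB rest [] true) by
              simp [goB]]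
          rw [ihV]
          have hsplit : mySplit ('=' :: rest)
              = ('=' :: rest.takeWhile (· != '/')) :: restSegs rest := by
            rw [show mySplit ('=' :: rest) = (mySplit rest).modifyHead ('=' :: ·) by
                  simp [mySplit, hne]]
            rw [mySplit_eq_cons rest]
            rfl
          rw [hsplit]
          have hhead : fmtPartA (run ++ '=' :: rest.takeWhile (· != '/'))
              = cGREEN ++ run ++ '=' :: (cRESET ++ cBOLD ++ rest.takeWhile (· != '/') ++ cRESET) := by
            rw [fmtPartA_with_eq _ (by simp)]
            have htw : (run ++ '=' :: rest.takeWhile (· != '/')).takeWhile (· != '=') = run := by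
              rw [List.takeWhile_append_of_pos (by
                    intro x hx
                    simp only [bne_iff_ne, ne_eq]
                    rintro rfl
                    exact h1 hx)]
              simp
            rw [htw]
            have hdr : (run ++ '=' :: rest.takeWhile (· != '/')).drop (run.length + 1)
                = rest.takeWhile (· != '/') := by
              simp [List.drop_length_add_append (l₁ := run) (i := 1)]
            rw [hdr]
          cases hdrop : rest.dropWhile (· != '/') with
          | nil =>
            have hseg : restSegs rest = [] := by simp [restSegs, hdrop]
            simp [hseg, hhead]
          | cons d r =>
            have hseg : restSegs rest = mySplit r := by simp [restSegs, hdrop]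
            rw [hseg]
            simp only [List.modifyHead_cons, List.map_cons]
            rw [join_cons _ _ (by simp [mySplit_ne_nil r]), hhead]
            simp
        · by_cases hs : c = '/'
          · subst hs
            rw [show goB ('/' :: rest) run false = run ++ '/' :: goB rest [] false by simp [goB]]
            rw [ihK [] (by simp) (by simp), modifyHead_id]
            rw [show mySplit ('/' :: rest) = [] :: mySplit rest by simp [mySplit]]
            simp only [List.modifyHead_cons, List.map_cons, List.append_nil]
            rw [join_cons _ _ (by simpa using mySplit_ne_nil rest), fmtPartA_no_eq _ h1]
          · rw [show goB (c :: rest) run false = goB rest (run ++ [c]) false by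
                simp [goB, hc, hs]]
            rw [ihK (run ++ [c])
                  (by intro hmem
                      rcases List.mem_append.1 hmem with hm | hm
                      · exact h1 hm
                      · exact hc (List.mem_singleton.1 hm).symm)
                  (by intro hmem
                      rcases List.mem_append.1 hmem with hm | hm
                      · exact h2 hm
                      · exact hs (List.mem_singleton.1 hm).symm)]
            rw [show mySplit (c :: rest) = (mySplit rest).modifyHead (c :: ·) by simp [mySplit, hs]]
            rw [List.modifyHead_modifyHead]
            have hfun : (fun x => run ++ [c] ++ x) = ((fun x => run ++ x) ∘ (c :: ·)) := by
              funext x; simp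
            rw [hfun]
      · -- value mode
        by_cases hs : c = '/'
        · subst hs
          rw [show goB ('/' :: rest) [] true = cRESET ++ '/' :: goB rest [] false by simp [goB]]
          rw [ihK [] (by simp) (by simp), modifyHead_id]
          simp
        · rw [show goB (c :: rest) [] true = c :: goB rest [] true by simp [goB, hs]]
          rw [ihV]
          simp [hs]

-- ===== VERDICT (by name: the statement is the Claim_ definition above) =====
theorem format_config_path_spec : Claim_equal_format_config_path := by
  intro path _
  unfold Spec_format_config_path format_config_path format_config_path_alt
  by_cases hp : path = ""
  · subst hp; rfl
  · simp only [hp, if_false]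
    have hB := ((goB_inv path.toList.length path.toList le_rfl).1 [] (by simp) (by simp))
    rw [hB, PySem.List.foldl_append_singleton_eq_map, splitOn_eq, List.nil_append, modifyHead_id]
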